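-- pv_equiv track=rewrite | github.com/slavov-vili/ba_thesis | activation_code/act_alg_tests.py | calc_item_enc_offset_bias
-- ===== SOURCE A (Python) =====
-- def calc_item_enc_offset_bias(item, item_to_indices_1, item_to_indices_2):
--     """
--     Calculates the encounter index offset bias for the given item.
--
--     NOTE: the function assumes, that both histories contain the same items, just in possibly different orders
--     """
--     idx_bias = 0
--     # Store the encounter indices of the item from the respective map
--     item_encs_1 = item_to_indices_1[item]
--     item_encs_2 = item_to_indices_2[item]
--     # Get the length of the smaller encounter index list
--     most_encs = max(len(item_encs_1), len(item_encs_2))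
--     # Add all index differences to the bias
--     for i in range(most_encs):
--         encs_1_idx = item_encs_1[i] if i < len(item_encs_1) else 0
--         encs_2_idx = item_encs_2[i] if i < len(item_encs_2) else 0
--         idx_bias += encs_1_idx - encs_2_idx
--     return idx_bias
-- ===== SOURCE B (Python) =====
-- def calc_item_enc_offset_bias(item, item_to_indices_1, item_to_indices_2):
--     item_encs_1 = item_to_indices_1[item]
--     item_encs_2 = item_to_indices_2[item]
--     return sum(item_encs_1) - sum(item_encs_2)
-- ===== Notes on version B (the rewrite author's own statement) =====
-- stated objective: simpler
-- what changed: Replaces the fused index-paired loop with zero-padding up to max length by two independent sums subtracted (zero-padding makes the pairing irrelevant).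
import Mathlib
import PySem

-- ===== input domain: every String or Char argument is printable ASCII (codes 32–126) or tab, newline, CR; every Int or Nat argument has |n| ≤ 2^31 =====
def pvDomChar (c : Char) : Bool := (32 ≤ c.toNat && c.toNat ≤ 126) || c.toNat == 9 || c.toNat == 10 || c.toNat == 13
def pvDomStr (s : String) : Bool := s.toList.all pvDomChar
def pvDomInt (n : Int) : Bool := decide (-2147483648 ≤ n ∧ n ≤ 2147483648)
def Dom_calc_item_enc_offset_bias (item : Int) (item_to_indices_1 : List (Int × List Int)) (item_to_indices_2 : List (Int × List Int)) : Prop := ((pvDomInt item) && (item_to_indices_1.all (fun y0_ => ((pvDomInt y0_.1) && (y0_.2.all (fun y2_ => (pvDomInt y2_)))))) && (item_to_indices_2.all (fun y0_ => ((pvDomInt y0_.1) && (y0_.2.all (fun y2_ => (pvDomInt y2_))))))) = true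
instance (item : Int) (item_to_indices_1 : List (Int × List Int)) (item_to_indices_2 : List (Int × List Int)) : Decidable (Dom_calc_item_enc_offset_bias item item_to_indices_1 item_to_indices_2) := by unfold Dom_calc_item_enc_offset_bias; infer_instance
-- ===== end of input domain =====

-- B replaces A's fused max-length loop with zero-padding by two independent sums, subtracted (simpler).

-- ===== PORT A =====
-- A: look up both index lists, then loop i over range(max(len1,len2)), adding (pad1 - pad2).
def calc_item_enc_offset_bias (item : Int) (item_to_indices_1 : List (Int × List Int)) (item_to_indices_2 : List (Int × List Int)) : Int :=
  match (PySem.Dict.mk item_to_indices_1).get? item, (PySem.Dict.mk item_to_indices_2).get? item with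
  | some item_encs_1, some item_encs_2 =>
    let most_encs := max item_encs_1.length item_encs_2.length
    (List.range most_encs).foldl (fun idx_bias i =>
      idx_bias + ((if i < item_encs_1.length then item_encs_1.getD i 0 else 0)
                  - (if i < item_encs_2.length then item_encs_2.getD i 0 else 0))) 0
  | _, _ => 0  -- unreachable under Pre_ (Python raises KeyError)

-- ===== PORT B =====
-- B: look up both lists, sum each, subtract.
def calc_item_enc_offset_bias_alt (item : Int) (item_to_indices_1 : List (Int × List Int)) (item_to_indices_2 : List (Int × List Int)) : Int :=
  match (PySem.Dict.mk item_to_indices_1).get? item with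
  | none => 0  -- unreachable under Pre_ (Python raises KeyError)
  | some item_encs_1 =>
    match (PySem.Dict.mk item_to_indices_2).get? item with
    | none => 0  -- unreachable under Pre_ (Python raises KeyError)
    | some item_encs_2 => item_encs_1.sum - item_encs_2.sum

-- ===== PRECONDITION & SPEC =====
-- Pre_: item must be a key of both maps; otherwise Python A (and B) raises KeyError.
def Pre_calc_item_enc_offset_bias (item : Int) (item_to_indices_1 : List (Int × List Int)) (item_to_indices_2 : List (Int × List Int)) : Prop :=
  item ∈ item_to_indices_1.map Prod.fst ∧ item ∈ item_to_indices_2.map Prod.fst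
instance (item : Int) (item_to_indices_1 : List (Int × List Int)) (item_to_indices_2 : List (Int × List Int)) : Decidable (Pre_calc_item_enc_offset_bias item item_to_indices_1 item_to_indices_2) := by unfold Pre_calc_item_enc_offset_bias; infer_instance

def pvWitness_calc_item_enc_offset_bias : Int × (List (Int × List Int)) × (List (Int × List Int)) :=
  (1, [(1, [2, 5])], [(1, [3])])

def Spec_calc_item_enc_offset_bias (item : Int) (item_to_indices_1 : List (Int × List Int)) (item_to_indices_2 : List (Int × List Int)) (out : Int) : Prop := out = calc_item_enc_offset_bias_alt item item_to_indices_1 item_to_indices_2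
instance (item : Int) (item_to_indices_1 : List (Int × List Int)) (item_to_indices_2 : List (Int × List Int)) (out : Int) : Decidable (Spec_calc_item_enc_offset_bias item item_to_indices_1 item_to_indices_2 out) := by unfold Spec_calc_item_enc_offset_bias; infer_instance

-- ===== CLAIM (what is proved, stated in full; the proofs are below) =====
def Claim_equal_calc_item_enc_offset_bias : Prop := ∀ (item : Int) (item_to_indices_1 : List (Int × List Int)) (item_to_indices_2 : List (Int × List Int)), Dom_calc_item_enc_offset_bias item item_to_indices_1 item_to_indices_2 → Pre_calc_item_enc_offset_bias item item_to_indices_1 item_to_indices_2 → Spec_calc_item_enc_offset_bias item item_to_indices_1 item_to_indices_2 (calc_item_enc_offset_bias item item_to_indices_1 item_to_indices_2)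

-- ===== LEMMAS AND PROOFS =====

lemma sum_map_sub_int (xs : List Nat) (f g : Nat → Int) :
    (xs.map (fun i => f i - g i)).sum = (xs.map f).sum - (xs.map g).sum := by
  induction xs with
  | nil => simp
  | cons x xs ih => simp [ih]; ring

-- summing the zero-padded entries of l over range n (n ≥ length) gives l.sum
lemma padded_sum (l : List Int) (n : Nat) (h : l.length ≤ n) :
    ((List.range n).map (fun i => if i < l.length then l.getD i 0 else 0)).sum = l.sum := by
  induction n with
  | zero =>
    interval_cases hl : l.length
    simp [List.length_eq_zero_iff.mp hl]
  | succ n ih =>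
    rcases Nat.lt_or_ge l.length (n + 1) with hlt | hge
    · rw [List.range_succ]
      simp only [List.map_append, List.sum_append, List.map_cons, List.map_nil]
      rw [ih (by omega)]
      simp [Nat.not_lt.mpr (by omega : l.length ≤ n)]
    · have hlen : l.length = n + 1 := le_antisymm h hge
      rw [← hlen]
      have : (List.range l.length).map (fun i => if i < l.length then l.getD i 0 else 0)
           = (List.range l.length).map (fun i => l.getD i 0) := by
        apply List.map_congr_left
        intro i hi
        simp [List.mem_range.mp hi]
      rw [this]
      congr 1
      exact List.ext_getElem (by simp) (by intro i h1 h2; simp [List.getD, List.getElem?_eq_getElem h2])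

lemma fold_eq_sub (e1 e2 : List Int) :
    (List.range (max e1.length e2.length)).foldl (fun b i =>
        b + ((if i < e1.length then e1.getD i 0 else 0)
             - (if i < e2.length then e2.getD i 0 else 0))) 0
    = e1.sum - e2.sum := by
  rw [PySem.List.foldl_add, zero_add]
  have h1 := padded_sum e1 (max e1.length e2.length) (le_max_left _ _)
  have h2 := padded_sum e2 (max e1.length e2.length) (le_max_right _ _)
  calc ((List.range (max e1.length e2.length)).map (fun i =>
          (if i < e1.length then e1.getD i 0 else 0)
          - (if i < e2.length then e2.getD i 0 else 0))).sum
      = ((List.range (max e1.length e2.length)).map (fun i => if i < e1.length then e1.getD i 0 else 0)).sum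
        - ((List.range (max e1.length e2.length)).map (fun i => if i < e2.length then e2.getD i 0 else 0)).sum := by
        exact sum_map_sub_int _ _ _
    _ = e1.sum - e2.sum := by rw [h1, h2]

-- ===== VERDICT (by name: the statement is the Claim_ definition above) =====
theorem calc_item_enc_offset_bias_spec : Claim_equal_calc_item_enc_offset_bias := by
  intro item d1 d2 _ hpre
  obtain ⟨h1, h2⟩ := hpre
  unfold Spec_calc_item_enc_offset_bias calc_item_enc_offset_bias calc_item_enc_offset_bias_alt
  have g1 : ((PySem.Dict.mk d1).get? item).isSome := by
    rw [Option.isSome_iff_ne_none]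
    intro hn
    exact ((PySem.Dict.get?_eq_none_iff_not_mem_keys _ _).mp hn) (by simpa using h1)
  have g2 : ((PySem.Dict.mk d2).get? item).isSome := by
    rw [Option.isSome_iff_ne_none]
    intro hn
    exact ((PySem.Dict.get?_eq_none_iff_not_mem_keys _ _).mp hn) (by simpa using h2)
  obtain ⟨e1, he1⟩ := Option.isSome_iff_exists.mp g1
  obtain ⟨e2, he2⟩ := Option.isSome_iff_exists.mp g2
  rw [he1, he2]
  exact fold_eq_sub e1 e2
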